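-- pv_equiv track=rewrite | github.com/Kchilala/Beer-world | app/task4.py | beer_styles_per_country
-- ===== SOURCE A (Python) =====
-- def beer_styles_per_country(data: list[dict],) -> dict[str,int]:
--     """
--     Gives a dictionary which tells me how many beer styles per country there are.
--     :param data: this is the list which contains a dictionary with all the data.
--     :return: this gives me a dictionary with a string and a lists.
--
--     """
--
--     count1_styles: dict(str, list[str]) = {}
--
--     for beer in data:
--
--         if beer ['country'] not in count1_styles:
--             lst: list = []
--             lst.append(beer['style_name'])
--             count1_styles[beer['country']] = lst
--
--         else:
--             count1_styles[beer['country']].append(beer['style_name'])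
--
--     count2_styles:  dict(str, list(str)) = {}
--
--     for country, styles in count1_styles.items():
--         special_items_set = set(['unclassified'])
--         special_list: list = []
--
--         for style in styles:
--
--             if style not in special_items_set:
--                 special_items_set.add(style)
--                 special_list.append(style)
--
--             else:
--                 pass
--
--         count2_styles[country] = special_list
--
--
--     count3_styles: dict[str, int] = {}
--
--     for country, styles in count2_styles.items():
--         count3_styles[country] = len(styles)
--
--     sorted_styles = dict(sorted(count3_styles.items(), key = lambda item: item[1], reverse = True))
--
--     return sorted_styles
-- ===== SOURCE B (Python) =====
-- def beer_styles_per_country(data: list[dict],) -> dict[str, int]: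
--     # One pass: country -> set of distinct non-'unclassified' styles; then count and sort.
--     styles = {}
--     for beer in data:
--         s = styles.get(beer['country'], set())
--         if beer['style_name'] != 'unclassified':
--             s.add(beer['style_name'])
--         styles[beer['country']] = s
--     counts = {c: len(v) for c, v in styles.items()}
--     return dict(sorted(counts.items(), key=lambda kv: kv[1], reverse=True))
-- ===== Notes on version B (the rewrite author's own statement) =====
-- stated objective: simpler
-- what changed: A's three sequential dict passes (group styles into per-country lists, then dedup each list against a seeded set, then count) are fused into one pass that keeps a set of distinct non-'unclassified' styles per country, followed by a len() comprehension and the same sort.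
import Mathlib
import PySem

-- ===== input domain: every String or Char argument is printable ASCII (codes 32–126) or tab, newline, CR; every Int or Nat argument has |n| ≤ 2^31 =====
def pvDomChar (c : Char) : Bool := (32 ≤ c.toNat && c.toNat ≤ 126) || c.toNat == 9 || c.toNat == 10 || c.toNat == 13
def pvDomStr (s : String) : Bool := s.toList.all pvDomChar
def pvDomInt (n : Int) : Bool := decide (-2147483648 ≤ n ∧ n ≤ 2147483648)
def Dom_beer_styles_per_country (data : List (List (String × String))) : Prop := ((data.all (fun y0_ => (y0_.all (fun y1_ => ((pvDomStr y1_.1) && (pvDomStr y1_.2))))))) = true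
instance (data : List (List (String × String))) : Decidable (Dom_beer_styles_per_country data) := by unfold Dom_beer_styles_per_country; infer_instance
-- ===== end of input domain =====

-- B fuses A's three dict-building passes into one pass keeping a set of distinct
-- non-'unclassified' styles per country (return value only; neither mutates its argument).


-- ===== PORT A =====
-- count1 loop body: group style names into a per-country list ('not in' creates [style], else appends).
def pvAStep (d : PySem.Dict String (List String)) (beer : List (String × String)) :
    PySem.Dict String (List String) :=
  if d.contains ((PySem.Dict.mk beer).getD "country" "") = false then
    d.insert ((PySem.Dict.mk beer).getD "country" "") [(PySem.Dict.mk beer).getD "style_name" ""]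
  else
    d.insert ((PySem.Dict.mk beer).getD "country" "")
      (((d.get? ((PySem.Dict.mk beer).getD "country" "")).getD []) ++
        [(PySem.Dict.mk beer).getD "style_name" ""])

-- inner loop body of count2: the (special_items_set, special_list) pair.
def pvAPairStep (st : PySem.Set String × List String) (style : String) :
    PySem.Set String × List String :=
  if PySem.Set.contains st.1 style = false then (PySem.Set.add st.1 style, st.2 ++ [style])
  else st

-- inner dedup loop of count2 for one country's style list
def pvADedup (styles : List String) : List String :=
  (styles.foldl pvAPairStep (PySem.Set.ofList ["unclassified"], [])).2

def beer_styles_per_country (data : List (List (String × String))) : List (String × Int) :=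
  let count1 : PySem.Dict String (List String) := data.foldl pvAStep PySem.Dict.empty
  let count2 : PySem.Dict String (List String) :=
    count1.items.foldl (fun d p => d.insert p.1 (pvADedup p.2)) PySem.Dict.empty
  let count3 : PySem.Dict String Int :=
    count2.items.foldl (fun d p => d.insert p.1 (p.2.length : Int)) PySem.Dict.empty
  (PySem.Dict.ofList (PySem.List.sorted count3.items (fun p => p.2) true)).items

-- ===== PORT B =====
-- one fused step: fetch (or create) the country's style set, add the style unless 'unclassified'
def pvBStep (d : PySem.Dict String (PySem.Set String)) (beer : List (String × String)) :
    PySem.Dict String (PySem.Set String) :=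
  d.insert ((PySem.Dict.mk beer).getD "country" "")
    (if (PySem.Dict.mk beer).getD "style_name" "" ≠ "unclassified" then
      PySem.Set.add (d.getD ((PySem.Dict.mk beer).getD "country" "") PySem.Set.empty)
        ((PySem.Dict.mk beer).getD "style_name" "")
    else d.getD ((PySem.Dict.mk beer).getD "country" "") PySem.Set.empty)

def beer_styles_per_country_alt (data : List (List (String × String))) : List (String × Int) :=
  let styles : PySem.Dict String (PySem.Set String) := data.foldl pvBStep PySem.Dict.empty
  let counts : PySem.Dict String Int :=
    styles.items.foldl (fun d p => d.insert p.1 (PySem.Set.len p.2)) PySem.Dict.empty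
  (PySem.Dict.ofList (PySem.List.sorted counts.items (fun p => p.2) true)).items

-- ===== PRECONDITION & SPEC =====
-- A raises KeyError when some record lacks the key 'country' or 'style_name'; Pre_ excludes exactly those.
def Pre_beer_styles_per_country (data : List (List (String × String))) : Prop :=
  ∀ beer ∈ data, (PySem.Dict.mk beer).contains "country" = true ∧
    (PySem.Dict.mk beer).contains "style_name" = true
instance (data : List (List (String × String))) : Decidable (Pre_beer_styles_per_country data) := by
  unfold Pre_beer_styles_per_country; infer_instance

def pvWitness_beer_styles_per_country : (List (List (String × String))) :=
  [[("country", "BE"), ("style_name", "ale")], [("country", "BE"), ("style_name", "unclassified")]]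

def Spec_beer_styles_per_country (data : List (List (String × String))) (out : List (String × Int)) : Prop := out = beer_styles_per_country_alt data
instance (data : List (List (String × String))) (out : List (String × Int)) : Decidable (Spec_beer_styles_per_country data out) := by unfold Spec_beer_styles_per_country; infer_instance

-- ===== CLAIM (what is proved, stated in full; the proofs are below) =====
def Claim_equal_beer_styles_per_country : Prop := ∀ (data : List (List (String × String))), Dom_beer_styles_per_country data → Pre_beer_styles_per_country data → Spec_beer_styles_per_country data (beer_styles_per_country data)

-- ===== LEMMAS AND PROOFS =====

-- conditional add performed by B's fused loop
def pvCondAdd (s : PySem.Set String) (x : String) : PySem.Set String :=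
  if x ≠ "unclassified" then PySem.Set.add s x else s

-- the style set B keeps for a country whose A-side style list is xs
def pvG (xs : List String) : PySem.Set String := xs.foldl pvCondAdd PySem.Set.empty

def pvLift (p : String × List String) : String × PySem.Set String := (p.1, pvG p.2)

lemma pvG_append (v : List String) (x : String) : pvG (v ++ [x]) = pvCondAdd (pvG v) x := by
  simp [pvG, List.foldl_append]

-- A's inner pair step from an accumulator whose set is "unclassified" :: its list
lemma pvAPairStep_eq (l : List String) (x : String) :
    pvAPairStep ("unclassified" :: l, l) x = ("unclassified" :: pvCondAdd l x, pvCondAdd l x) := by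
  by_cases hx : x = "unclassified"
  · simp [pvAPairStep, pvCondAdd, hx, PySem.Set.contains]
  · by_cases hm : x ∈ l
    · simp [pvAPairStep, pvCondAdd, hx, hm, PySem.Set.contains, PySem.Set.add]
    · simp [pvAPairStep, pvCondAdd, hx, hm, PySem.Set.contains, PySem.Set.add]

lemma pvADedup_aux (xs : List String) : ∀ (l : List String),
    (xs.foldl pvAPairStep ("unclassified" :: l, l)).2 = xs.foldl pvCondAdd l := by
  induction xs with
  | nil => intro l; rfl
  | cons x xs ih =>
    intro l
    rw [List.foldl_cons, List.foldl_cons, pvAPairStep_eq]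
    exact ih (pvCondAdd l x)

-- the deduplicated style list A builds IS the element list of B's style set
lemma pvADedup_eq_pvG (xs : List String) : pvADedup xs = pvG xs := by
  have h := pvADedup_aux xs []
  exact h

-- lookup in a literal dict whose values were mapped through a function
lemma pvGet?_mk_map {β γ : Type} (f : β → γ) (l : List (String × β)) (k : String) :
    (PySem.Dict.mk (l.map (fun p => (p.1, f p.2)))).get? k =
      ((PySem.Dict.mk l).get? k).map f := by
  induction l with
  | nil => rfl
  | cons p t ih =>
    rw [List.map_cons, PySem.Dict.get?_mk_cons, PySem.Dict.get?_mk_cons]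
    cases h : p.1 == k
    · simpa [h] using ih
    · simp

lemma pvContains_mk_map (l : List (String × List String)) (k : String) :
    (PySem.Dict.mk (l.map pvLift)).contains k = (PySem.Dict.mk l).contains k := by
  rw [PySem.Dict.contains_eq_isSome_get?, PySem.Dict.contains_eq_isSome_get?,
    show l.map pvLift = l.map (fun p => (p.1, pvG p.2)) from rfl, pvGet?_mk_map]
  cases (PySem.Dict.mk l).get? k <;> rfl

-- one fused step of B simulates one grouping step of A through pvLift
lemma pvStep_comm (d : PySem.Dict String (List String)) (beer : List (String × String)) :
    pvBStep (PySem.Dict.mk (d.items.map pvLift)) beer =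
      PySem.Dict.mk ((pvAStep d beer).items.map pvLift) := by
  obtain ⟨l⟩ := d
  have hitems : (PySem.Dict.mk (l.map pvLift) : PySem.Dict String (PySem.Set String)).items
      = l.map pvLift := rfl
  have hmap : l.map pvLift = l.map (fun p => (p.1, pvG p.2)) := rfl
  set c := (PySem.Dict.mk beer).getD "country" "" with hc
  set s := (PySem.Dict.mk beer).getD "style_name" "" with hs
  have hcont : (PySem.Dict.mk (l.map pvLift)).contains c = (PySem.Dict.mk l).contains c :=
    pvContains_mk_map l c
  by_cases h : (PySem.Dict.mk l).contains c = false
  · -- new country: both sides append a fresh entry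
    have hcontB : (PySem.Dict.mk (l.map pvLift)).contains c = false := by rw [hcont]; exact h
    have hget : (PySem.Dict.mk (l.map pvLift)).getD c PySem.Set.empty = PySem.Set.empty :=
      PySem.Dict.getD_of_not_contains _ _ hcontB
    apply PySem.Dict.ext
    rw [show pvAStep (PySem.Dict.mk l) beer
          = (PySem.Dict.mk l).insert c [s] by rw [pvAStep, if_pos h],
      PySem.Dict.items_insert_of_not_contains _ _ h]
    rw [show pvBStep (PySem.Dict.mk (l.map pvLift)) beer
          = (PySem.Dict.mk (l.map pvLift)).insert c
              (if s ≠ "unclassified" then PySem.Set.add (PySem.Set.empty) s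
               else PySem.Set.empty) by rw [pvBStep, ← hc, ← hs, hget],
      PySem.Dict.items_insert_of_not_contains _ _ hcontB]
    simp [pvLift, pvG, pvCondAdd]
  · -- existing country: both sides overwrite the entry in place
    have h' : (PySem.Dict.mk l).contains c = true := by
      cases hcase : (PySem.Dict.mk l).contains c
      · exact absurd hcase h
      · rfl
    have hcontB : (PySem.Dict.mk (l.map pvLift)).contains c = true := by rw [hcont]; exact h'
    obtain ⟨v, hv⟩ : ∃ v, (PySem.Dict.mk l).get? c = some v := by
      rw [PySem.Dict.contains_eq_isSome_get?] at h'
      cases hg : (PySem.Dict.mk l).get? c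
      · rw [hg] at h'; simp at h'
      · exact ⟨_, rfl⟩
    have hgetB : (PySem.Dict.mk (l.map pvLift)).getD c PySem.Set.empty = pvG v := by
      rw [PySem.Dict.getD_eq_get?_getD, hmap, pvGet?_mk_map, hv]; rfl
    apply PySem.Dict.ext
    rw [show pvAStep (PySem.Dict.mk l) beer
          = (PySem.Dict.mk l).insert c (v ++ [s]) by
        rw [pvAStep, if_neg (by rw [h']; simp), hv]; rfl,
      PySem.Dict.items_insert_of_contains _ _ h']
    rw [show pvBStep (PySem.Dict.mk (l.map pvLift)) beer
          = (PySem.Dict.mk (l.map pvLift)).insert c (pvCondAdd (pvG v) s) by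
        rw [pvBStep, ← hc, ← hs, hgetB]; rfl,
      PySem.Dict.items_insert_of_contains _ _ hcontB]
    rw [hitems, List.map_map, List.map_map]
    apply List.map_congr_left
    intro p _
    by_cases hp : p.1 = c
    · simp [pvLift, Function.comp, hp, pvG_append]
    · simp [pvLift, Function.comp, hp]

-- the fused pass, over the whole list
lemma pvLoop_comm (data : List (List (String × String))) :
    ∀ (d : PySem.Dict String (List String)),
    data.foldl pvBStep (PySem.Dict.mk (d.items.map pvLift)) =
      PySem.Dict.mk ((data.foldl pvAStep d).items.map pvLift) := by
  induction data with
  | nil => intro d; rfl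
  | cons beer rest ih =>
    intro d
    rw [List.foldl_cons, List.foldl_cons, pvStep_comm d beer]
    exact ih (pvAStep d beer)

-- A's grouping loop keeps keys unique
lemma pvNodup_A (data : List (List (String × String))) :
    ∀ (d : PySem.Dict String (List String)), d.keys.Nodup →
    (data.foldl pvAStep d).keys.Nodup := by
  induction data with
  | nil => intro d h; exact h
  | cons beer rest ih =>
    intro d h
    rw [List.foldl_cons]
    apply ih
    unfold pvAStep
    split
    · exact PySem.Dict.nodup_keys_insert _ _ _ h
    · exact PySem.Dict.nodup_keys_insert _ _ _ h

-- ===== VERDICT (by name: the statement is the Claim_ definition above) =====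
theorem beer_styles_per_country_spec : Claim_equal_beer_styles_per_country := by
  intro data _ _
  unfold Spec_beer_styles_per_country
  show beer_styles_per_country data = beer_styles_per_country_alt data
  set d1 := data.foldl pvAStep PySem.Dict.empty with hd1
  have hstyles : data.foldl pvBStep PySem.Dict.empty = PySem.Dict.mk (d1.items.map pvLift) := by
    have h := pvLoop_comm data PySem.Dict.empty
    simpa using h
  have hnd : (d1.items.map (·.1)).Nodup := pvNodup_A data PySem.Dict.empty (by simp)
  -- count2 / count3 items on the A side
  have h2 : (d1.items.foldl (fun d p => d.insert p.1 (pvADedup p.2)) PySem.Dict.empty).items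
      = d1.items.map (fun p => (p.1, pvADedup p.2)) := by
    simpa using PySem.Dict.items_foldl_insert_fresh d1.items (fun p => p.1)
      (fun p => pvADedup p.2) PySem.Dict.empty (fun a _ => rfl) hnd
  have hnd2 : ((d1.items.map (fun p => (p.1, pvADedup p.2))).map (fun p => p.1)).Nodup := by
    rw [List.map_map]; simpa using hnd
  have h3 : ((d1.items.map (fun p => (p.1, pvADedup p.2))).foldl
        (fun d p => d.insert p.1 (p.2.length : Int)) PySem.Dict.empty).items
      = (d1.items.map (fun p => (p.1, pvADedup p.2))).map (fun p => (p.1, (p.2.length : Int))) := by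
    simpa using PySem.Dict.items_foldl_insert_fresh
      (d1.items.map (fun p => (p.1, pvADedup p.2))) (fun p => p.1)
      (fun p => (p.2.length : Int)) PySem.Dict.empty (fun a _ => rfl) hnd2
  -- counts items on the B side
  have hndB : ((d1.items.map pvLift).map (fun p => p.1)).Nodup := by
    rw [List.map_map]; simpa [pvLift] using hnd
  have hB : ((d1.items.map pvLift).foldl
        (fun d p => d.insert p.1 (PySem.Set.len p.2)) PySem.Dict.empty).items
      = (d1.items.map pvLift).map (fun p => (p.1, PySem.Set.len p.2)) := by
    simpa using PySem.Dict.items_foldl_insert_fresh (d1.items.map pvLift) (fun p => p.1)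
      (fun p => PySem.Set.len p.2) PySem.Dict.empty (fun a _ => rfl) hndB
  -- both count dicts have the same items
  have hfinal : (d1.items.map (fun p => (p.1, pvADedup p.2))).map (fun p => (p.1, (p.2.length : Int)))
      = (d1.items.map pvLift).map (fun p => (p.1, PySem.Set.len p.2)) := by
    rw [List.map_map, List.map_map]
    apply List.map_congr_left
    intro p _
    simp [pvLift, Function.comp, pvADedup_eq_pvG, PySem.Set.len]
  simp only [beer_styles_per_country, beer_styles_per_country_alt, ← hd1, hstyles]
  rw [h2, h3, hB, hfinal]
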